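-- pv_equiv track=rewrite | github.com/leo248/pythresh | t_threshold_encrypt.py | find_hyperplanes_for_secret_line
-- ===== SOURCE A (Python) =====
-- def point_in_plane(point, plane):
--     """
--     This function checks if a point is in a plane.
--     """
--     return point in plane
--
-- def line_in_plane(line, plane):
--     """
--     This function checks if a line is in a plane.
--     """
--     return all(point_in_plane(point, plane) for point in line)
--
-- def find_hyperplanes_for_secret_line(hyperplanes, secret_line):
--     """
--     This function finds all the hyperplanes that intersect the secret line.
--     """
--     result = {}
--     for point in secret_line:
--         result[point] = []
--         for plane_id, plane in hyperplanes.items():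
--             if point_in_plane(point, plane) and not line_in_plane(secret_line,
--                                                                   plane):
--                 result[point].append(hyperplanes[plane_id])
--     return result
-- ===== SOURCE B (Python) =====
-- def find_hyperplanes_for_secret_line(hyperplanes, secret_line):
--     result = {}
--     for point in secret_line:
--         result.setdefault(point, [])
--     for plane in hyperplanes.values():
--         contained = [p for p in result if p in plane]
--         if len(contained) < len(result):
--             for p in contained:
--                 result[p].append(plane)
--     return result
-- ===== Notes on version B (the rewrite author's own statement) =====
-- stated objective: faster
-- what changed: Loop interchanged to a single pass over hyperplanes: each plane's intersection with the line is computed once and the 'whole line contained' test becomes a length comparison of that intersection, instead of re-testing every plane (including the full line-in-plane scan) separately for every point of the secret line.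
import Mathlib
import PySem

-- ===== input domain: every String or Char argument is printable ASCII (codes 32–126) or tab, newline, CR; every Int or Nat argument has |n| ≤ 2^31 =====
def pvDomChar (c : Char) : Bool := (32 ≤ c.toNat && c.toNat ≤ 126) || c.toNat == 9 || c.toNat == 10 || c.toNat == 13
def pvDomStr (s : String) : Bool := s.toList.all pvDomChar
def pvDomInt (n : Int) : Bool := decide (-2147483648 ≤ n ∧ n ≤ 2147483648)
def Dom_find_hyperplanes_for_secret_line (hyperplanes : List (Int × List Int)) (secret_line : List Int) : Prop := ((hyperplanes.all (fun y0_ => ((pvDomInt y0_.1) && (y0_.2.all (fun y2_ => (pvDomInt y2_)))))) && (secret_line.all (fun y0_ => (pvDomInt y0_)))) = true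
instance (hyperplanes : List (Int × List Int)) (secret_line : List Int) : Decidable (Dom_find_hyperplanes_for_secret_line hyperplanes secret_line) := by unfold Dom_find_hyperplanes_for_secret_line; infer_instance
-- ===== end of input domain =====

-- B replaces A's per-point rescan of all planes (each with a full line-in-plane containment test) by one
-- pass over the planes, distributing each plane to the points of its intersection with the line.

-- ===== PORT A =====
def point_in_plane (point : Int) (plane : List Int) : Bool := plane.contains point
def line_in_plane (line : List Int) (plane : List Int) : Bool :=
  line.all (fun point => point_in_plane point plane)
def find_hyperplanes_for_secret_line (hyperplanes : List (Int × List Int)) (secret_line : List Int) : List (Int × List (List Int)) :=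
  let hp : PySem.Dict Int (List Int) := PySem.Dict.ofList hyperplanes
  let result : PySem.Dict Int (List (List Int)) :=
    secret_line.foldl (fun result point =>
      (hp.items.foldl (fun result pp =>
        if point_in_plane point pp.2 && !(line_in_plane secret_line pp.2) then
          result.modify point [] (fun l => l ++ [hp.getD pp.1 []])
        else result) (result.insert point []))) PySem.Dict.empty
  result.items

-- ===== PORT B =====
def find_hyperplanes_for_secret_line_alt (hyperplanes : List (Int × List Int)) (secret_line : List Int) : List (Int × List (List Int)) :=
  let hp : PySem.Dict Int (List Int) := PySem.Dict.ofList hyperplanes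
  let init : PySem.Dict Int (List (List Int)) :=
    secret_line.foldl (fun r point => r.setdefault point []) PySem.Dict.empty
  let final : PySem.Dict Int (List (List Int)) :=
    hp.values.foldl (fun r plane =>
      let contained := r.keys.filter (fun p => plane.contains p)
      if contained.length < r.keys.length then
        contained.foldl (fun r p => r.modify p [] (fun lst => lst ++ [plane])) r
      else r) init
  final.items

-- ===== PRECONDITION & SPEC =====
def Spec_find_hyperplanes_for_secret_line (hyperplanes : List (Int × List Int)) (secret_line : List Int) (out : List (Int × List (List Int))) : Prop := out = find_hyperplanes_for_secret_line_alt hyperplanes secret_line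
instance (hyperplanes : List (Int × List Int)) (secret_line : List Int) (out : List (Int × List (List Int))) : Decidable (Spec_find_hyperplanes_for_secret_line hyperplanes secret_line out) := by unfold Spec_find_hyperplanes_for_secret_line; infer_instance

-- ===== CLAIM (what is proved, stated in full; the proofs are below) =====
def Claim_equal_find_hyperplanes_for_secret_line : Prop := ∀ (hyperplanes : List (Int × List Int)) (secret_line : List Int), Dom_find_hyperplanes_for_secret_line hyperplanes secret_line → Spec_find_hyperplanes_for_secret_line hyperplanes secret_line (find_hyperplanes_for_secret_line hyperplanes secret_line)

-- ===== LEMMAS AND PROOFS =====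
-- A's inner loop only touches key `p`: its getD at `p` accumulates the filtered planes.
lemma pv_innerA_getD (hp : PySem.Dict Int (List Int)) (c : Int × List Int → Bool)
    (l : List (Int × List Int)) (d : PySem.Dict Int (List (List Int))) (p q : Int) :
    (l.foldl (fun r pp => if c pp then r.modify p [] (fun v => v ++ [hp.getD pp.1 []]) else r) d).getD q []
      = if q = p then d.getD q [] ++ (l.filter c).map (fun pp => hp.getD pp.1 []) else d.getD q [] := by
  induction l generalizing d with
  | nil => simp
  | cons pp t ih =>
    simp only [List.foldl_cons, List.filter_cons]
    by_cases hc : c pp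
    · rw [if_pos hc, ih]
      by_cases hq : q = p
      · subst hq; simp [hc]
      · simp [hq, PySem.Dict.getD_modify]
    · rw [if_neg hc, ih]
      simp [hc]

lemma pv_innerA_keys (hp : PySem.Dict Int (List Int)) (c : Int × List Int → Bool)
    (l : List (Int × List Int)) (d : PySem.Dict Int (List (List Int))) (p : Int) (hmem : p ∈ d.keys) :
    (l.foldl (fun r pp => if c pp then r.modify p [] (fun v => v ++ [hp.getD pp.1 []]) else r) d).keys = d.keys := by
  induction l generalizing d with
  | nil => rfl
  | cons pp t ih =>
    simp only [List.foldl_cons]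
    by_cases hc : c pp
    · have hk : (d.modify p [] (fun v => v ++ [hp.getD pp.1 []])).keys = d.keys := by
        rw [PySem.Dict.keys_modify, PySem.Dict.keys_insert_of_contains _ _ ((PySem.Dict.contains_iff_mem_keys d p).2 hmem)]
      rw [if_pos hc, ih _ (by rw [hk]; exact hmem), hk]
    · rw [if_neg hc, ih _ hmem]
-- A's outer loop: getD of the accumulated dict.
lemma pv_outerA_getD (hp : PySem.Dict Int (List Int)) (sl : List Int)
    (pts : List Int) (d : PySem.Dict Int (List (List Int))) (k : Int) :
    (pts.foldl (fun result point =>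
        (hp.items.foldl (fun result pp =>
          if point_in_plane point pp.2 && !(line_in_plane sl pp.2) then
            result.modify point [] (fun l => l ++ [hp.getD pp.1 []])
          else result) (result.insert point []))) d).getD k []
      = if k ∈ pts then
          (hp.items.filter (fun pp => point_in_plane k pp.2 && !(line_in_plane sl pp.2))).map (fun pp => hp.getD pp.1 [])
        else d.getD k [] := by
  induction pts generalizing d with
  | nil => simp
  | cons point t ih =>
    simp only [List.foldl_cons]
    rw [ih]
    by_cases hk : k ∈ t
    · simp [hk]
    · by_cases hkp : k = point
      · subst hkp
        rw [if_neg hk, pv_innerA_getD, if_pos rfl, PySem.Dict.getD_insert]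
        simp [hk]
      · rw [if_neg hk, pv_innerA_getD, if_neg hkp, PySem.Dict.getD_insert]
        simp [hk, hkp]

-- A's outer loop: keys accumulate as Python-set update.
lemma pv_outerA_keys (hp : PySem.Dict Int (List Int)) (sl : List Int)
    (pts : List Int) (d : PySem.Dict Int (List (List Int))) :
    (pts.foldl (fun result point =>
        (hp.items.foldl (fun result pp =>
          if point_in_plane point pp.2 && !(line_in_plane sl pp.2) then
            result.modify point [] (fun l => l ++ [hp.getD pp.1 []])
          else result) (result.insert point []))) d).keys
      = PySem.Set.update d.keys pts := by
  induction pts generalizing d with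
  | nil => rfl
  | cons point t ih =>
    simp only [List.foldl_cons]
    rw [ih, pv_innerA_keys, PySem.Set.update_cons]
    · congr 1
      by_cases hm : point ∈ d.keys
      · rw [PySem.Dict.keys_insert_of_contains _ _ ((PySem.Dict.contains_iff_mem_keys d point).2 hm),
            PySem.Set.add_of_mem hm]
      · rw [PySem.Dict.keys_insert_of_not_contains _ _ (by
              rw [← Bool.not_eq_true]; intro h; exact hm ((PySem.Dict.contains_iff_mem_keys d point).1 h)),
            PySem.Set.add_of_not_mem hm]
    · exact (PySem.Dict.mem_keys_insert _ _ _ _).2 (Or.inl rfl)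

-- B's init loop: setdefault with [] never changes any getD-with-[].
lemma pv_initB_getD (sl : List Int) (d : PySem.Dict Int (List (List Int))) (k : Int) :
    (sl.foldl (fun r point => r.setdefault point []) d).getD k [] = d.getD k [] := by
  induction sl generalizing d with
  | nil => rfl
  | cons p t ih =>
    simp only [List.foldl_cons]
    rw [ih]
    by_cases hc : d.contains p = true
    · rw [PySem.Dict.setdefault_of_contains _ _ hc]
    · rw [PySem.Dict.setdefault_of_not_contains _ _ (by simpa using hc), PySem.Dict.getD_insert]
      by_cases hk : k = p
      · subst hk; rw [if_pos rfl, PySem.Dict.getD_of_not_contains _ _ (by simpa using hc)]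
      · rw [if_neg hk]

-- B's init loop: keys accumulate as Python-set update.
lemma pv_initB_keys (sl : List Int) (d : PySem.Dict Int (List (List Int))) :
    (sl.foldl (fun r point => r.setdefault point []) d).keys = PySem.Set.update d.keys sl := by
  induction sl generalizing d with
  | nil => rfl
  | cons p t ih =>
    simp only [List.foldl_cons]
    rw [ih, PySem.Set.update_cons]
    congr 1
    by_cases hc : d.contains p = true
    · rw [PySem.Dict.setdefault_of_contains _ _ hc,
          PySem.Set.add_of_mem ((PySem.Dict.contains_iff_mem_keys d p).1 hc)]
    · rw [PySem.Dict.setdefault_of_not_contains _ _ (by simpa using hc),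
          PySem.Dict.keys_insert_of_not_contains _ _ (by simpa using hc),
          PySem.Set.add_of_not_mem (fun hm => hc ((PySem.Dict.contains_iff_mem_keys d p).2 hm))]

-- B's distribution loop over the (duplicate-free) contained points: getD.
lemma pv_innerB_getD (v : List Int) (c : List Int) (hc : c.Nodup)
    (d : PySem.Dict Int (List (List Int))) (q : Int) :
    (c.foldl (fun r p => r.modify p [] (fun l => l ++ [v])) d).getD q []
      = if q ∈ c then d.getD q [] ++ [v] else d.getD q [] := by
  induction c generalizing d with
  | nil => simp
  | cons p t ih =>
    simp only [List.foldl_cons]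
    rw [ih (List.Nodup.of_cons hc)]
    by_cases hq : q ∈ t
    · have hqp : q ≠ p := fun h => (List.nodup_cons.1 hc).1 (h ▸ hq)
      simp [hq, hqp, PySem.Dict.getD_modify]
    · by_cases hqp : q = p
      · subst hqp; simp [hq]
      · simp [hq, hqp, PySem.Dict.getD_modify]

-- Set.update by elements already present is the identity.
lemma pv_setFull {s : PySem.Set Int} {xs : List Int} (h : ∀ x ∈ xs, x ∈ s) :
    PySem.Set.update s xs = s := by
  rw [PySem.Set.update_eq_append_filter]
  have hnil : (PySem.Set.ofList xs).filter (fun y => !PySem.Set.contains s y) = [] := by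
    apply List.filter_eq_nil_iff.2
    intro a ha
    have := h a ((PySem.Set.mem_ofList xs a).1 ha)
    simp_all
  rw [hnil, List.append_nil]

-- A plane contains the whole line iff it contains every distinct point of it.
lemma pv_cond_all (sl plane : List Int) (keys : List Int) (hk : keys = PySem.List.dedup sl)
    (hcond : ¬ (keys.filter (fun p => plane.contains p)).length < keys.length) :
    sl.all (fun q => plane.contains q) = true := by
  have hle := List.length_filter_le (fun p => plane.contains p) keys
  have heq : (keys.filter (fun p => plane.contains p)).length = keys.length := by omega
  have hall := List.length_filter_eq_length_iff.1 heq
  rw [List.all_eq_true]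
  intro x hx
  exact hall x (by rw [hk]; exact (PySem.List.mem_dedup sl x).2 hx)

-- B's plane loop: keys stay the distinct line points, values accumulate the filtered planes.
lemma pv_outerB (sl : List Int) (l : List (List Int)) (d : PySem.Dict Int (List (List Int)))
    (hk : d.keys = PySem.List.dedup sl) :
    (l.foldl (fun r plane =>
        if (r.keys.filter (fun p => plane.contains p)).length < r.keys.length then
          (r.keys.filter (fun p => plane.contains p)).foldl (fun r p => r.modify p [] (fun lst => lst ++ [plane])) r
        else r) d).keys = PySem.List.dedup sl
    ∧ ∀ k, (l.foldl (fun r plane =>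
        if (r.keys.filter (fun p => plane.contains p)).length < r.keys.length then
          (r.keys.filter (fun p => plane.contains p)).foldl (fun r p => r.modify p [] (fun lst => lst ++ [plane])) r
        else r) d).getD k []
      = if k ∈ sl then
          d.getD k [] ++ l.filter (fun plane => plane.contains k && !(sl.all (fun q => plane.contains q)))
        else d.getD k [] := by
  induction l generalizing d with
  | nil => exact ⟨hk, fun k => by by_cases hks : k ∈ sl <;> simp [hks]⟩
  | cons plane t ih =>
    simp only [List.foldl_cons]
    by_cases hcond : ((d.keys.filter (fun p => plane.contains p)).length < d.keys.length)
    · rw [if_pos hcond]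
      have hnodupK : d.keys.Nodup := hk ▸ PySem.List.nodup_dedup sl
      have hsub : ∀ x ∈ d.keys.filter (fun p => plane.contains p), x ∈ d.keys :=
        fun x hx => (List.mem_filter.1 hx).1
      have hknew : ((d.keys.filter (fun p => plane.contains p)).foldl
          (fun r p => r.modify p [] (fun lst => lst ++ [plane])) d).keys = PySem.List.dedup sl := by
        rw [PySem.Dict.keys_foldl_modify, pv_setFull hsub, hk]
      obtain ⟨ih1, ih2⟩ := ih _ hknew
      refine ⟨ih1, fun k => ?_⟩
      rw [ih2 k, pv_innerB_getD _ _ (hnodupK.filter _)]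
      have hnall : sl.all (fun q => plane.contains q) = false := by
        rw [← Bool.not_eq_true]
        intro hall
        have : ∀ x ∈ d.keys, plane.contains x = true := by
          intro x hx
          exact (List.all_eq_true.1 hall) x ((PySem.List.mem_dedup sl x).1 (hk ▸ hx))
        rw [List.length_filter_eq_length_iff.2 this] at hcond
        omega
      by_cases hks : k ∈ sl
      · have hkD : k ∈ d.keys := by rw [hk]; exact (PySem.List.mem_dedup sl k).2 hks
        rw [if_pos hks, if_pos hks, List.filter_cons]
        by_cases hcp : plane.contains k = true
        · rw [if_pos (List.mem_filter.2 ⟨hkD, hcp⟩)]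
          have hpred : (plane.contains k && !(sl.all fun q => plane.contains q)) = true := by
            rw [hcp, hnall]; rfl
          rw [if_pos hpred]
          simp
        · rw [if_neg (fun hm => hcp (List.mem_filter.1 hm).2)]
          have hpred : (plane.contains k && !(sl.all fun q => plane.contains q)) = false := by
            have hcpf : plane.contains k = false := by simpa using hcp
            rw [hcpf, Bool.false_and]
          rw [if_neg (by rw [hpred]; exact Bool.false_ne_true)]
      · have hkD : k ∉ d.keys := by rw [hk]; exact fun hm => hks ((PySem.List.mem_dedup sl k).1 hm)
        rw [if_neg hks, if_neg hks, if_neg (fun hm => hkD (hsub k hm))]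
    · rw [if_neg hcond]
      obtain ⟨ih1, ih2⟩ := ih _ hk
      refine ⟨ih1, fun k => ?_⟩
      rw [ih2 k]
      by_cases hks : k ∈ sl
      · rw [if_pos hks, if_pos hks, List.filter_cons]
        have hpred : (plane.contains k && !(sl.all fun q => plane.contains q)) = false := by
          rw [pv_cond_all sl plane d.keys hk hcond]; simp
        rw [if_neg (by rw [hpred]; exact Bool.false_ne_true)]
      · simp [hks]

-- The two ports agree: both dicts have the distinct line points as keys, with equal values.
lemma pv_main (hps : List (Int × List Int)) (sl : List Int) :
    find_hyperplanes_for_secret_line hps sl = find_hyperplanes_for_secret_line_alt hps sl := by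
  have hA : find_hyperplanes_for_secret_line hps sl
      = (sl.foldl (fun result point =>
          ((PySem.Dict.ofList hps).items.foldl (fun result pp =>
            if point_in_plane point pp.2 && !(line_in_plane sl pp.2) then
              result.modify point [] (fun l => l ++ [(PySem.Dict.ofList hps).getD pp.1 []])
            else result) (result.insert point []))) PySem.Dict.empty).items := rfl
  have hB : find_hyperplanes_for_secret_line_alt hps sl
      = ((PySem.Dict.ofList hps).values.foldl (fun r plane =>
          if (r.keys.filter (fun p => plane.contains p)).length < r.keys.length then
            (r.keys.filter (fun p => plane.contains p)).foldl (fun r p => r.modify p [] (fun lst => lst ++ [plane])) r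
          else r) (sl.foldl (fun r point => r.setdefault point []) PySem.Dict.empty)).items := rfl
  rw [hA, hB]
  have hpnd := PySem.Dict.nodup_keys_ofList hps
  have hkeysA : (sl.foldl (fun result point =>
          ((PySem.Dict.ofList hps).items.foldl (fun result pp =>
            if point_in_plane point pp.2 && !(line_in_plane sl pp.2) then
              result.modify point [] (fun l => l ++ [(PySem.Dict.ofList hps).getD pp.1 []])
            else result) (result.insert point []))) PySem.Dict.empty).keys = PySem.List.dedup sl := by
    rw [pv_outerA_keys, PySem.Dict.keys_empty, PySem.Set.update_nil_left]
    simp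
  have hkeysInit : (sl.foldl (fun r point => r.setdefault point [])
        (PySem.Dict.empty : PySem.Dict Int (List (List Int)))).keys
      = PySem.List.dedup sl := by
    rw [pv_initB_keys, PySem.Dict.keys_empty, PySem.Set.update_nil_left]
    simp
  obtain ⟨hkeysB, hgetB⟩ := pv_outerB sl (PySem.Dict.ofList hps).values
    (sl.foldl (fun r point => r.setdefault point [])
      (PySem.Dict.empty : PySem.Dict Int (List (List Int)))) hkeysInit
  have hndA : (sl.foldl (fun result point =>
          ((PySem.Dict.ofList hps).items.foldl (fun result pp =>
            if point_in_plane point pp.2 && !(line_in_plane sl pp.2) then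
              result.modify point [] (fun l => l ++ [(PySem.Dict.ofList hps).getD pp.1 []])
            else result) (result.insert point []))) PySem.Dict.empty).keys.Nodup := by
    rw [hkeysA]; exact PySem.List.nodup_dedup sl
  have hndB : ((PySem.Dict.ofList hps).values.foldl (fun r plane =>
          if (r.keys.filter (fun p => plane.contains p)).length < r.keys.length then
            (r.keys.filter (fun p => plane.contains p)).foldl (fun r p => r.modify p [] (fun lst => lst ++ [plane])) r
          else r) (sl.foldl (fun r point => r.setdefault point [])
            (PySem.Dict.empty : PySem.Dict Int (List (List Int))))).keys.Nodup := by
    rw [hkeysB]; exact PySem.List.nodup_dedup sl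
  rw [PySem.Dict.items_eq_map_keys _ hndA [],
      PySem.Dict.items_eq_map_keys _ hndB [],
      hkeysA, hkeysB]
  apply List.map_congr_left
  intro k hkmem
  have hksl : k ∈ sl := (PySem.List.mem_dedup sl k).1 hkmem
  rw [pv_outerA_getD, if_pos hksl, hgetB k, if_pos hksl, pv_initB_getD,
      PySem.Dict.getD_empty, List.nil_append]
  congr 1
  have hmapeq : ((PySem.Dict.ofList hps).items.filter
        (fun pp => point_in_plane k pp.2 && !(line_in_plane sl pp.2))).map
          (fun pp => (PySem.Dict.ofList hps).getD pp.1 [])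
      = ((PySem.Dict.ofList hps).items.filter
        (fun pp => point_in_plane k pp.2 && !(line_in_plane sl pp.2))).map (fun pp => pp.2) := by
    apply List.map_congr_left
    intro pp hpp
    exact PySem.Dict.getD_of_mem_items _ (by simpa using List.mem_of_mem_filter hpp) hpnd []
  rw [hmapeq]
  simp only [point_in_plane, line_in_plane, PySem.Dict.values, List.filter_map]
  rfl

-- ===== VERDICT (by name: the statement is the Claim_ definition above) =====
theorem find_hyperplanes_for_secret_line_spec : Claim_equal_find_hyperplanes_for_secret_line := by
  intro hyperplanes secret_line _
  unfold Spec_find_hyperplanes_for_secret_line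
  exact pv_main hyperplanes secret_line
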